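-- pv_equiv track=rewrite | github.com/miliar/Code_Jam_Webscraper | solutions_python/Problem_201/1245.py | solve
-- ===== SOURCE A (Python) =====
-- def pop(state, k, n):
--     state[k] -= n
--     if state[k] == 0:
--         state.pop(k)
--
-- def add(state, k, n):
--     state.setdefault(k, 0)
--     state[k] += n
--
-- def solve(n, k):
--     state = {n: 1}
--     while k > 1:
--         s = max(state.keys())
--         c = min(state[s], k - 1)
--         a, b = int(s / 2), int((s - 1) / 2)
--         pop(state, s, c)
--         add(state, a, c)
--         add(state, b, c)
--         k -= c
--
--     s = max(state.keys())
--     a, b = int(s / 2), int((s - 1) / 2)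
--     return (a, b)
-- ===== SOURCE B (Python) =====
-- def solve(n, k):
--     # Closed form: person k is served at BFS depth d = k.bit_length() - 1.
--     # At that depth the n - 2**d + 1 remaining stalls are spread over 2**d
--     # segments whose sizes are ceil/floor of m / 2**d; larger segments are
--     # served first, so person k (0-based rank p within its depth) gets a
--     # "big" segment exactly when p < m % 2**d.
--     if k <= 1:
--         s = n
--     else:
--         d = k.bit_length() - 1
--         q = 2 ** d
--         p = k - q
--         m = n - q + 1
--         big = -(-m // q)
--         small = m // q
--         s = big if p < m % q else small
--     return (int(s / 2), int((s - 1) / 2))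
-- ===== Notes on version B (the rewrite author's own statement) =====
-- stated objective: simpler
-- what changed: Replaces A's multiset simulation (a dict of segment sizes, repeatedly splitting the max-size class level by level) with a closed-form computation: the BFS depth of person k is k.bit_length()-1 and the two possible segment sizes at that depth are ceil/floor of (n-2**d+1)/2**d, so the answer is pure arithmetic with no loop and no dict.
-- outside the precondition, e.g. on solve(-60, 3): A returns (-7, -8), B returns (-15, -16); on solve(5, 7): A returns (0, 0), B returns (0, 0)
import Mathlib
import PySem

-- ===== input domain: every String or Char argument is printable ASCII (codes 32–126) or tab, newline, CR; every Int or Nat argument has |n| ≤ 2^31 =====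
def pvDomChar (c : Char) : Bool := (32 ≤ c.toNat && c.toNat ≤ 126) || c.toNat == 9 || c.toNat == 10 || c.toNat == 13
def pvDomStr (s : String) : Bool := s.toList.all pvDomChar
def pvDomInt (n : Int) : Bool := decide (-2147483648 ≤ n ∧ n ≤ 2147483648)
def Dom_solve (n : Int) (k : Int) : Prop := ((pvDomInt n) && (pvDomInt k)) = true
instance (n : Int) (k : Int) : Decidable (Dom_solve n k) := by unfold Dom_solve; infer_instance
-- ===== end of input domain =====

-- B replaces A's dict-multiset simulation by closed-form arithmetic on the BFS depth of k (exact on 1 ≤ k ≤ n).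

-- ===== PORT A =====
-- pop(state, k, n): state[k] -= n; if state[k] == 0: state.pop(k)
-- (state[k] -= n is ported with getD; A only calls it with k present)
def pvPop (st : PySem.Dict Int Int) (key : Int) (c : Int) : PySem.Dict Int Int :=
  let st1 := st.modify key 0 (· - c)
  if st1.getD key 0 == 0 then st1.erase key else st1

-- add(state, k, n): state.setdefault(k, 0); state[k] += n
def pvAdd (st : PySem.Dict Int Int) (key : Int) (c : Int) : PySem.Dict Int Int :=
  (st.setdefault key 0).modify key 0 (· + c)

-- the while-loop of A; fuel only makes the recursion structural: the loop runs at
-- most k-1 times (k strictly decreases each pass), so fuel = k.toNat is enough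
def solveLoop (fuel : Nat) (st : PySem.Dict Int Int) (k : Int) : PySem.Dict Int Int × Int :=
  match fuel with
  | 0 => (st, k)
  | fuel + 1 =>
    if 1 < k then
      let s := (PySem.List.max? st.keys (fun x => x)).getD 0
      let c := min (st.getD s 0) (k - 1)
      let a := PySem.Int.truncdiv s 2      -- int(s / 2), exact for |s| ≤ 2^31
      let b := PySem.Int.truncdiv (s - 1) 2
      solveLoop fuel (pvAdd (pvAdd (pvPop st s c) a c) b c) (k - c)
    else (st, k)

def solve (n : Int) (k : Int) : Int × Int :=
  let r := solveLoop k.toNat (PySem.Dict.ofList [(n, (1 : Int))]) k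
  let s := (PySem.List.max? r.1.keys (fun x => x)).getD 0
  (PySem.Int.truncdiv s 2, PySem.Int.truncdiv (s - 1) 2)

-- ===== PORT B =====
-- the s computed by Source B: bit_length gives the BFS depth of person k
def solveAltS (n : Int) (k : Int) : Int :=
  if k ≤ 1 then n
  else
    let d : Nat := PySem.Int.bitLength k - 1
    let q : Int := 2 ^ d
    let p := k - q
    let m := n - q + 1
    let big := -(PySem.Int.floordiv (-m) q)
    let small := PySem.Int.floordiv m q
    if p < PySem.Int.mod m q then big else small

def solve_alt (n : Int) (k : Int) : Int × Int :=
  let s := solveAltS n k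
  (PySem.Int.truncdiv s 2, PySem.Int.truncdiv (s - 1) 2)

-- ===== PRECONDITION & SPEC =====
-- Pre_ is the problem's natural domain (Code Jam: 1 ≤ k ≤ n) plus every k ≤ 1 (no serving
-- happens, both return the plain split of n). Excluded are only the k > max(n,1) inputs,
-- where A still returns but the value is an accident of simulating more people than stalls.
def Pre_solve (n : Int) (k : Int) : Prop := k ≤ 1 ∨ k ≤ n
instance (n : Int) (k : Int) : Decidable (Pre_solve n k) := by unfold Pre_solve; infer_instance
def pvWitness_solve : Int × Int := (5, 3)
def Spec_solve (n : Int) (k : Int) (out : Int × Int) : Prop := out = solve_alt n k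
instance (n : Int) (k : Int) (out : Int × Int) : Decidable (Spec_solve n k out) := by unfold Spec_solve; infer_instance

-- ===== CLAIM (what is proved, stated in full; the proofs are below) =====
def Claim_equal_solve : Prop := ∀ (n : Int) (k : Int), Dom_solve n k → Pre_solve n k → Spec_solve n k (solve n k)

-- ===== LEMMAS AND PROOFS =====


-- the max-key expression of A
def maxKey (st : PySem.Dict Int Int) : Int := (PySem.List.max? st.keys (fun x => x)).getD 0

-- the exact dict A holds when it is about to start serving BFS level e (q = 2^e):
-- r segments of size sm+1 (inserted first), q-r of size sm
def headDict (n : Int) (q : Int) : PySem.Dict Int Int :=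
  if PySem.Int.mod (n - q + 1) q = 0 then
    PySem.Dict.mk [(PySem.Int.floordiv (n - q + 1) q, q)]
  else
    PySem.Dict.mk [(PySem.Int.floordiv (n - q + 1) q + 1, PySem.Int.mod (n - q + 1) q),
                   (PySem.Int.floordiv (n - q + 1) q, q - PySem.Int.mod (n - q + 1) q)]

-- ---------- generic evaluation lemmas ----------

lemma map_if_key_eq_self (x : Int) (pnew : Int × Int) (l : List (Int × Int))
    (hl : ∀ p ∈ l, p.1 ≠ x) :
    l.map (fun p => if (p.1 == x) = true then pnew else p) = l := by
  induction l with
  | nil => rfl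
  | cons a t ih =>
      have ha : (a.1 == x) = false := by simp [hl a (by simp)]
      simp only [List.map_cons, ha, Bool.false_eq_true, if_false]
      rw [ih (fun p hp => hl p (by simp [hp]))]

lemma pvAdd_eq (d : PySem.Dict Int Int) (k c : Int) :
    pvAdd d k c = d.insert k (d.getD k 0 + c) := by
  unfold pvAdd
  by_cases h : d.contains k = true
  · rw [PySem.Dict.setdefault_of_contains d 0 h]; rfl
  · have h' : d.contains k = false := by simpa using h
    rw [PySem.Dict.setdefault_of_not_contains d 0 h']
    unfold PySem.Dict.modify
    rw [PySem.Dict.getD_insert_self, PySem.Dict.insert_insert_self,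
      PySem.Dict.getD_of_not_contains d 0 h']

lemma pvPop_keep (d : PySem.Dict Int Int) (key c v : Int)
    (h : d.getD key 0 = v) (hne : v - c ≠ 0) :
    pvPop d key c = d.insert key (v - c) := by
  unfold pvPop PySem.Dict.modify
  simp only [h]
  rw [if_neg]
  simp [PySem.Dict.getD_insert_self, hne]

lemma pvPop_all (d : PySem.Dict Int Int) (key c : Int) (h : d.getD key 0 = c) :
    pvPop d key c = (d.insert key (c - c)).erase key := by
  unfold pvPop PySem.Dict.modify
  simp only [h]
  rw [if_pos]
  simp [PySem.Dict.getD_insert_self]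

lemma loop_stop (fuel : Nat) (st : PySem.Dict Int Int) (k : Int) (h : ¬ 1 < k) :
    solveLoop fuel st k = (st, k) := by
  cases fuel <;> simp [solveLoop, h]

lemma loop_step' (fuel : Nat) (st : PySem.Dict Int Int) (k s c : Int) (h : 1 < k)
    (hs : (PySem.List.max? st.keys (fun x => x)).getD 0 = s)
    (hc : min (st.getD s 0) (k - 1) = c) :
    solveLoop (fuel + 1) st k =
      solveLoop fuel
        (pvAdd (pvAdd (pvPop st s c) (PySem.Int.truncdiv s 2) c)
          (PySem.Int.truncdiv (s - 1) 2) c) (k - c) := by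
  simp [solveLoop, h, hs, hc]

lemma maxKey_eq_of (st : PySem.Dict Int Int) (v : Int)
    (hmem : v ∈ st.keys) (hb : ∀ x ∈ st.keys, x ≤ v) : maxKey st = v := by
  unfold maxKey
  obtain ⟨m, hm⟩ : ∃ m, PySem.List.max? st.keys (fun x => x) = some m := by
    cases hmax : PySem.List.max? st.keys (fun x => x) with
    | none =>
        rw [PySem.List.max?_eq_none_iff] at hmax
        rw [hmax] at hmem
        simp at hmem
    | some m => exact ⟨m, rfl⟩
  have h1 : m ∈ st.keys := PySem.List.max?_mem hm
  have h2 : v ≤ m := PySem.List.max?_isMax hm v hmem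
  have h3 : m ≤ v := hb m h1
  simp [hm]; omega

lemma mem_keys_pvAdd (d : PySem.Dict Int Int) (k c x : Int) :
    x ∈ (pvAdd d k c).keys ↔ x = k ∨ x ∈ d.keys := by
  rw [pvAdd_eq]
  exact PySem.Dict.mem_keys_insert d k x (d.getD k 0 + c)

-- insert into a literal dict
lemma insert_mk_nil (k w : Int) : (PySem.Dict.mk ([] : List (Int × Int))).insert k w = PySem.Dict.mk [(k, w)] := by
  apply PySem.Dict.ext; simp [PySem.Dict.items_insert, PySem.Dict.contains]

lemma insert_mk_head (x v w : Int) (l : List (Int × Int)) (hl : ∀ p ∈ l, p.1 ≠ x) :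
    (PySem.Dict.mk ((x, v) :: l)).insert x w = PySem.Dict.mk ((x, w) :: l) := by
  apply PySem.Dict.ext
  have hc : (PySem.Dict.mk ((x, v) :: l)).contains x = true := by
    simp [PySem.Dict.contains]
  simp only [PySem.Dict.items_insert, hc, if_pos, List.map_cons, beq_self_eq_true]
  rw [map_if_key_eq_self x (x, w) l hl]

lemma insert_mk_tail (x v k w : Int) (l : List (Int × Int)) (hne : k ≠ x) :
    (PySem.Dict.mk ((x, v) :: l)).insert k w =
      PySem.Dict.mk ((x, v) :: ((PySem.Dict.mk l).insert k w).items) := by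
  apply PySem.Dict.ext
  have hx : (x == k) = false := by simp [Ne.symm hne]
  simp only [PySem.Dict.items_insert, PySem.Dict.contains, List.any_cons, hx, Bool.false_or]
  by_cases hc : (l.any fun p => p.1 == k) = true
  · simp only [hc, if_pos, List.map_cons, hx, Bool.false_eq_true, if_false]
  · simp only [hc, Bool.false_eq_true, if_false, List.cons_append]
lemma erase_mk (l : List (Int × Int)) (k : Int) :
    (PySem.Dict.mk l).erase k = PySem.Dict.mk (l.filter (fun p => !(p.1 == k))) := rfl

lemma getD_mk_head (x v : Int) (l : List (Int × Int)) :
    (PySem.Dict.mk ((x, v) :: l)).getD x 0 = v := by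
  simp [PySem.Dict.getD, PySem.Dict.get?]

lemma getD_mk_tail (x v k : Int) (l : List (Int × Int)) (hne : k ≠ x) :
    (PySem.Dict.mk ((x, v) :: l)).getD k 0 = (PySem.Dict.mk l).getD k 0 := by
  have hx : (x == k) = false := by simp [Ne.symm hne]
  simp [PySem.Dict.getD, PySem.Dict.get?, hx]


-- ---------- literal-dict step lemmas ----------

lemma ofList_single (n : Int) : PySem.Dict.ofList [(n, (1:Int))] = PySem.Dict.mk [(n, 1)] := by
  simp [PySem.Dict.ofList, PySem.Dict.update, PySem.Dict.insert, PySem.Dict.empty,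
    PySem.Dict.contains]

lemma pvAdd_nil (k c : Int) : pvAdd (PySem.Dict.mk []) k c = PySem.Dict.mk [(k, c)] := by
  rw [pvAdd_eq]
  have : (PySem.Dict.mk ([] : List (Int × Int))).getD k 0 = 0 := by
    simp [PySem.Dict.getD, PySem.Dict.get?]
  rw [this, insert_mk_nil]
  norm_num

lemma pvAdd_mk1_self (x v c : Int) :
    pvAdd (PySem.Dict.mk [(x, v)]) x c = PySem.Dict.mk [(x, v + c)] := by
  rw [pvAdd_eq, getD_mk_head, insert_mk_head]
  simp

lemma pvAdd_mk1_new (x v k c : Int) (h : k ≠ x) :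
    pvAdd (PySem.Dict.mk [(x, v)]) k c = PySem.Dict.mk [(x, v), (k, c)] := by
  rw [pvAdd_eq, getD_mk_tail x v k [] h]
  have h0 : (PySem.Dict.mk ([] : List (Int × Int))).getD k 0 = 0 := by
    simp [PySem.Dict.getD, PySem.Dict.get?]
  rw [h0, insert_mk_tail x v k _ [] h, insert_mk_nil]
  norm_num

lemma pvAdd_mk2_snd (x v y w c : Int) (hxy : x ≠ y) :
    pvAdd (PySem.Dict.mk [(x, v), (y, w)]) y c = PySem.Dict.mk [(x, v), (y, w + c)] := by
  rw [pvAdd_eq, getD_mk_tail x v y _ (Ne.symm hxy), getD_mk_head,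
    insert_mk_tail x v y _ _ (Ne.symm hxy), insert_mk_head]
  · simp

lemma pvAdd_mk2_new (x v y w k c : Int) (hkx : k ≠ x) (hky : k ≠ y) :
    pvAdd (PySem.Dict.mk [(x, v), (y, w)]) k c = PySem.Dict.mk [(x, v), (y, w), (k, c)] := by
  rw [pvAdd_eq, getD_mk_tail x v k _ hkx, getD_mk_tail y w k [] hky]
  have h0 : (PySem.Dict.mk ([] : List (Int × Int))).getD k 0 = 0 := by
    simp [PySem.Dict.getD, PySem.Dict.get?]
  rw [h0, insert_mk_tail x v k _ _ hkx, insert_mk_tail y w k _ [] hky, insert_mk_nil]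
  norm_num

lemma pvPop_mk1_part (x v c : Int) (h : v - c ≠ 0) :
    pvPop (PySem.Dict.mk [(x, v)]) x c = PySem.Dict.mk [(x, v - c)] := by
  rw [pvPop_keep _ _ _ v (getD_mk_head x v []) h, insert_mk_head]
  simp

lemma pvPop_mk1_all (x v : Int) :
    pvPop (PySem.Dict.mk [(x, v)]) x v = PySem.Dict.mk [] := by
  rw [pvPop_all _ _ _ (getD_mk_head x v []), insert_mk_head x v (v - v) [] (by simp),
    erase_mk]
  simp

lemma pvPop_mk2_fst_part (x v y w c : Int) (hyx : y ≠ x) (h : v - c ≠ 0) :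
    pvPop (PySem.Dict.mk [(x, v), (y, w)]) x c = PySem.Dict.mk [(x, v - c), (y, w)] := by
  rw [pvPop_keep _ _ _ v (getD_mk_head x v _) h, insert_mk_head]
  intro p hp; simp at hp; subst hp; simpa using hyx

lemma pvPop_mk2_fst_all (x v y w : Int) (hyx : y ≠ x) :
    pvPop (PySem.Dict.mk [(x, v), (y, w)]) x v = PySem.Dict.mk [(y, w)] := by
  rw [pvPop_all _ _ _ (getD_mk_head x v _),
    insert_mk_head x v (v - v) _ (by intro p hp; simp at hp; subst hp; simpa using hyx),
    erase_mk]
  simp [hyx]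

lemma pvPop_mk3_fst_part (x v y w z u c : Int) (hyx : y ≠ x) (hzx : z ≠ x) (h : v - c ≠ 0) :
    pvPop (PySem.Dict.mk [(x, v), (y, w), (z, u)]) x c
      = PySem.Dict.mk [(x, v - c), (y, w), (z, u)] := by
  rw [pvPop_keep _ _ _ v (getD_mk_head x v _) h, insert_mk_head]
  intro p hp; simp at hp
  rcases hp with hp | hp <;> subst hp <;> simpa using by assumption

lemma pvPop_mk3_fst_all (x v y w z u : Int) (hyx : y ≠ x) (hzx : z ≠ x) :
    pvPop (PySem.Dict.mk [(x, v), (y, w), (z, u)]) x v = PySem.Dict.mk [(y, w), (z, u)] := by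
  rw [pvPop_all _ _ _ (getD_mk_head x v _),
    insert_mk_head x v (v - v) _ ?_, erase_mk]
  · simp [hyx, hzx]
  · intro p hp; simp at hp
    rcases hp with hp | hp <;> subst hp <;> simpa using by assumption

lemma maxKey_mk1 (x v : Int) : maxKey (PySem.Dict.mk [(x, v)]) = x := by
  apply maxKey_eq_of <;> simp

lemma maxKey_mk2 (x v y w : Int) (h : y ≤ x) : maxKey (PySem.Dict.mk [(x, v), (y, w)]) = x := by
  apply maxKey_eq_of
  · simp
  · intro z hz; simp at hz
    rcases hz with hz | hz <;> omega

lemma maxKey_mk3 (x v y w z u : Int) (hy : y ≤ x) (hz : z ≤ x) :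
    maxKey (PySem.Dict.mk [(x, v), (y, w), (z, u)]) = x := by
  apply maxKey_eq_of
  · simp
  · intro a ha; simp at ha
    rcases ha with ha | ha | ha <;> omega

-- ---------- arithmetic lemmas ----------

lemma tdiv_two (x y : Int) (hx : 0 ≤ x) (hy : x = 2*y ∨ x = 2*y + 1) :
    PySem.Int.truncdiv x 2 = y := by
  unfold PySem.Int.truncdiv
  rw [Int.tdiv_eq_ediv_of_nonneg hx]
  omega

lemma tdiv_le (x : Int) (hx : 0 ≤ x) : PySem.Int.truncdiv x 2 ≤ x := by
  unfold PySem.Int.truncdiv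
  rw [Int.tdiv_eq_ediv_of_nonneg hx]
  omega

lemma bitLength_eq (e : Nat) (K : Int) (h1 : (2:Int)^e ≤ K) (h2 : K < 2^(e+1)) :
    PySem.Int.bitLength K = e + 1 := by
  have hA : ((2^e : Nat) : Int) = (2:Int)^e := by push_cast; ring
  have hA2 : ((2^(e+1) : Nat) : Int) = (2:Int)^(e+1) := by push_cast; ring
  have hK0 : 0 < K := lt_of_lt_of_le (by positivity) h1
  have hna : (K.natAbs : Int) = K := Int.natAbs_of_nonneg (le_of_lt hK0)
  have h1' : 2^e ≤ K.natAbs := by omega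
  have h2' : K.natAbs < 2^(e+1) := by omega
  set L := PySem.Int.bitLength K with hL
  have hub : K.natAbs < 2^L := PySem.Int.lt_two_pow_bitLength K
  have hlb : 2^(L-1) ≤ K.natAbs := PySem.Int.two_pow_bitLength_le K (by omega)
  by_contra hne
  rcases Nat.lt_or_ge L (e+1) with hlt | hge
  · have : (2:Nat)^L ≤ 2^e := Nat.pow_le_pow_right (by norm_num) (by omega)
    omega
  · have hge2 : e + 2 ≤ L := by omega
    have : (2:Nat)^(e+1) ≤ 2^(L-1) := Nat.pow_le_pow_right (by norm_num) (by omega)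
    omega

lemma salt_of_depth (e : Nat) (n K : Int) (h1 : (2:Int)^e ≤ K) (h2 : K < 2^(e+1)) (hK : 1 < K) :
    solveAltS n K =
      (if K - 2^e < PySem.Int.mod (n - 2^e + 1) (2^e)
       then PySem.Int.floordiv (n - 2^e + 1) (2^e) + 1
       else PySem.Int.floordiv (n - 2^e + 1) (2^e)) := by
  unfold solveAltS
  rw [if_neg (by omega), bitLength_eq e K h1 h2]
  simp only [Nat.add_sub_cancel]
  by_cases hbr : K - 2^e < PySem.Int.mod (n - 2^e + 1) (2^e)
  · rw [if_pos hbr, if_pos hbr]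
    have h0 : (0:Int) < 2^e := by positivity
    have hmul := PySem.Int.floordiv_mul_add_mod (n - 2^e + 1) (2^e)
    have hRlt := PySem.Int.mod_lt (n - 2^e + 1) h0
    have hr0 : 0 < PySem.Int.mod (n - 2^e + 1) (2^e) := by omega
    rw [(PySem.Int.neg_floordiv_neg_eq_iff_of_pos h0).mpr ⟨?_, ?_⟩]
    · nlinarith [hmul, hr0]
    · nlinarith [hmul, hRlt]
  · rw [if_neg hbr, if_neg hbr]

lemma headDict_form (n q sm2 r2 : Int) (hq : 0 < q) (h : sm2 * q + r2 = n - q + 1)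
    (h0 : 0 ≤ r2) (h1 : r2 < q) :
    headDict n q =
      (if r2 = 0 then PySem.Dict.mk [(sm2, q)]
       else PySem.Dict.mk [(sm2 + 1, r2), (sm2, q - r2)]) := by
  unfold headDict
  have hfd : PySem.Int.floordiv (n - q + 1) q = sm2 := by
    rw [PySem.Int.floordiv_eq_iff_of_pos hq]
    constructor
    · linarith
    · have hx : (sm2 + 1) * q = sm2 * q + q := by ring
      rw [hx]; linarith
  have hmd : PySem.Int.mod (n - q + 1) q = r2 := by
    have h2 := PySem.Int.floordiv_mul_add_mod (n - q + 1) q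
    rw [hfd] at h2
    linarith
  rw [hfd, hmd]

lemma loop_head : ∀ (fuel : Nat) (e : Nat) (n K : Int),
    (2:Int)^e ≤ K → K ≤ n → (K - 2^e).toNat ≤ fuel →
    maxKey (solveLoop fuel (headDict n (2^e)) (K - 2^e + 1)).1 = solveAltS n K := by
  intro fuel
  induction fuel using Nat.strong_induction_on with
  | _ fuel IH =>
  intro e n K hqK hKn hfuel
  have hq0 : (0:Int) < 2^e := by positivity
  have hq1 : (1:Int) ≤ 2^e := hq0
  have hm1 : (1:Int) ≤ n - 2^e + 1 := by omega
  obtain ⟨sm, hsmdef⟩ : ∃ x, PySem.Int.floordiv (n - 2^e + 1) (2^e) = x := ⟨_, rfl⟩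
  obtain ⟨r, hrdef⟩ : ∃ x, PySem.Int.mod (n - 2^e + 1) (2^e) = x := ⟨_, rfl⟩
  have hmr : sm * 2^e + r = n - 2^e + 1 := by
    have := PySem.Int.floordiv_mul_add_mod (n - 2^e + 1) (2^e)
    rw [hsmdef, hrdef] at this; exact this
  have hr0 : (0:Int) ≤ r := hrdef ▸ PySem.Int.mod_nonneg _ hq0
  have hrq : r < 2^e := hrdef ▸ PySem.Int.mod_lt _ hq0
  have hsm0 : (0:Int) ≤ sm := by nlinarith
  have hpow : (2:Int)^(e+1) = 2^e * 2 := by ring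
  have hHD := headDict_form n (2^e) sm r hq0 hmr hr0 hrq
  by_cases hKq : K = 2^e
  · -- the loop counter is already 1: the head dict's max answers
    rw [loop_stop _ _ _ (by omega)]
    dsimp only
    by_cases he : e = 0
    · subst he
      have hK1 : K = 1 := by simpa using hKq
      subst hK1
      have hr00 : r = 0 := by simp at hrq hr0; omega
      unfold solveAltS
      rw [if_pos (by norm_num), hHD, if_pos hr00, maxKey_mk1]
      simp at hmr
      omega
    · have hK2 : 1 < K := by
        have : (2:Int)^1 ≤ 2^e := pow_le_pow_right₀ (by norm_num) (by omega)
        omega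
      rw [salt_of_depth e n K hqK (by omega) hK2, hsmdef, hrdef, hHD]
      by_cases hrz : r = 0
      · rw [if_pos hrz, if_neg (by omega), maxKey_mk1]
      · rw [if_neg hrz, if_pos (by omega), maxKey_mk2 _ _ _ _ (by omega)]
  · -- K > 2^e: at least one more serving pass
    have hKgt : 2^e < K := by omega
    obtain ⟨f, rfl⟩ : ∃ f, fuel = f + 1 := ⟨fuel - 1, by omega⟩
    have hK2 : 1 < K := by omega
    rw [hHD]
    by_cases hrz : r = 0
    · rw [if_pos hrz]
      have hsm1 : (1:Int) ≤ sm := by nlinarith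
      by_cases hK2q : K < 2^e * 2
      · -- A1: partial service of a one-key level, then stop
        rw [loop_step' f _ (K - 2^e + 1) sm (K - 2^e) (by omega) (maxKey_mk1 sm (2^e))
          (by rw [getD_mk_head]; omega)]
        rw [pvPop_mk1_part sm (2^e) (K - 2^e) (by omega)]
        rw [loop_stop _ _ _ (by omega)]
        dsimp only
        rw [salt_of_depth e n K hqK (by rw [show (2:Int)^(e+1) = 2^e*2 by ring]; omega) hK2,
          hsmdef, hrdef, if_neg (by omega)]
        apply maxKey_eq_of
        · rw [mem_keys_pvAdd, mem_keys_pvAdd]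
          right; right; simp
        · intro x hx
          rw [mem_keys_pvAdd, mem_keys_pvAdd] at hx
          have hA := tdiv_le sm (by omega)
          have hB := tdiv_le (sm - 1) (by omega)
          rcases hx with hx | hx | hx
          · omega
          · omega
          · simp at hx; omega
      · -- A2: the whole (one-key) level is served; recurse
        rw [loop_step' f _ (K - 2^e + 1) sm (2^e) (by omega) (maxKey_mk1 sm (2^e))
          (by rw [getD_mk_head]; omega)]
        rw [pvPop_mk1_all sm (2^e)]
        rcases Int.even_or_odd sm with ⟨t, ht⟩ | ⟨t, ht⟩
        · -- sm = t + t (even, t ≥ 1)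
          have h1t : (1:Int) ≤ t := by omega
          rw [tdiv_two sm t (by omega) (by omega), tdiv_two (sm - 1) (t - 1) (by omega) (by omega)]
          rw [pvAdd_nil, pvAdd_mk1_new t (2^e) (t - 1) (2^e) (by omega)]
          have hmr' : (t + t) * 2^e + 0 = n - 2^e + 1 := by rw [← ht, ← hrz]; exact hmr
          have hD : PySem.Dict.mk [(t, (2:Int)^e), (t - 1, 2^e)] = headDict n (2^(e+1)) := by
            rw [headDict_form n (2^(e+1)) (t - 1) (2^e) (by positivity)
              (by linear_combination hmr')
              (by omega) (by rw [show (2:Int)^(e+1) = 2^e*2 by ring]; omega)]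
            rw [if_neg (by omega)]
            have e1 : t - 1 + 1 = t := by omega
            have e2 : (2:Int)^(e+1) - 2^e = 2^e := by rw [show (2:Int)^(e+1) = 2^e*2 by ring]; ring
            rw [e1, e2]
          rw [hD, show K - 2^e + 1 - 2^e = K - 2^(e+1) + 1 by rw [show (2:Int)^(e+1) = 2^e*2 by ring]; ring]
          exact IH f (by omega) (e+1) n K
            (by rw [show (2:Int)^(e+1) = 2^e*2 by ring]; omega) hKn
            (by rw [show (2:Int)^(e+1) = 2^e*2 by ring]; omega)
        · -- sm = 2t + 1 (odd)
          have h0t : (0:Int) ≤ t := by omega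
          rw [tdiv_two sm t (by omega) (by omega), tdiv_two (sm - 1) t (by omega) (by omega)]
          rw [pvAdd_nil, pvAdd_mk1_self]
          have hmr' : (2*t + 1) * 2^e + 0 = n - 2^e + 1 := by rw [← ht, ← hrz]; exact hmr
          have hD : PySem.Dict.mk [(t, (2:Int)^e + 2^e)] = headDict n (2^(e+1)) := by
            rw [headDict_form n (2^(e+1)) t 0 (by positivity)
              (by linear_combination hmr')
              (by omega) (by positivity)]
            rw [if_pos rfl]
            have e2 : (2:Int)^(e+1) = 2^e + 2^e := by rw [show (2:Int)^(e+1) = 2^e*2 by ring]; ring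
            rw [e2]
          rw [hD, show K - 2^e + 1 - 2^e = K - 2^(e+1) + 1 by rw [show (2:Int)^(e+1) = 2^e*2 by ring]; ring]
          exact IH f (by omega) (e+1) n K
            (by rw [show (2:Int)^(e+1) = 2^e*2 by ring]; omega) hKn
            (by rw [show (2:Int)^(e+1) = 2^e*2 by ring]; omega)
    · rw [if_neg hrz]
      have hr1 : (1:Int) ≤ r := by omega
      by_cases hB1 : K - 2^e < r
      · -- B1: stop while serving the big segments
        rw [loop_step' f _ (K - 2^e + 1) (sm + 1) (K - 2^e) (by omega)
          (maxKey_mk2 (sm + 1) r sm (2^e - r) (by omega)) (by rw [getD_mk_head]; omega)]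
        rw [show sm + 1 - 1 = sm from by ring]
        rw [pvPop_mk2_fst_part (sm + 1) r sm (2^e - r) (K - 2^e) (by omega) (by omega)]
        rw [loop_stop _ _ _ (by omega)]
        dsimp only
        rw [salt_of_depth e n K hqK (by rw [show (2:Int)^(e+1) = 2^e*2 by ring]; omega) hK2,
          hsmdef, hrdef, if_pos (by omega)]
        apply maxKey_eq_of
        · rw [mem_keys_pvAdd, mem_keys_pvAdd]
          right; right; simp
        · intro x hx
          rw [mem_keys_pvAdd, mem_keys_pvAdd] at hx
          have hA := tdiv_le (sm + 1) (by omega)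
          have hB := tdiv_le sm (by omega)
          rcases hx with hx | hx | hx
          · omega
          · omega
          · simp at hx; omega
      · -- B2: all big segments served
        have hsm1 : (1:Int) ≤ sm := by nlinarith [hmr, hKn]
        rw [loop_step' f _ (K - 2^e + 1) (sm + 1) r (by omega)
          (maxKey_mk2 (sm + 1) r sm (2^e - r) (by omega)) (by rw [getD_mk_head]; omega)]
        rw [show sm + 1 - 1 = sm from by ring]
        rw [pvPop_mk2_fst_all (sm + 1) r sm (2^e - r) (by omega)]
        rcases Int.even_or_odd sm with ⟨t, ht⟩ | ⟨t, ht⟩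
        · -- sm = t + t even, t ≥ 1
          have h1t : (1:Int) ≤ t := by omega
          rw [tdiv_two (sm + 1) t (by omega) (by omega), tdiv_two sm t (by omega) (by omega)]
          rw [pvAdd_mk1_new sm (2^e - r) t r (by omega),
            pvAdd_mk2_snd sm (2^e - r) t r r (by omega)]
          by_cases hstop : K - 2^e + 1 - r ≤ 1
          · rw [loop_stop _ _ _ (by omega)]
            dsimp only
            rw [salt_of_depth e n K hqK (by rw [show (2:Int)^(e+1) = 2^e*2 by ring]; omega) hK2,
              hsmdef, hrdef, if_neg (by omega), maxKey_mk2 _ _ _ _ (by omega)]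
          · obtain ⟨f', rfl⟩ : ∃ f', f = f' + 1 := ⟨f - 1, by omega⟩
            by_cases hK2q : K < 2^e * 2
            · -- stop among the small segments
              rw [loop_step' f' _ (K - 2^e + 1 - r) sm (K - 2^e - r) (by omega)
                (maxKey_mk2 sm (2^e - r) t (r + r) (by omega)) (by rw [getD_mk_head]; omega)]
              rw [pvPop_mk2_fst_part sm (2^e - r) t (r + r) (K - 2^e - r) (by omega) (by omega)]
              rw [loop_stop _ _ _ (by omega)]
              dsimp only
              rw [salt_of_depth e n K hqK (by rw [show (2:Int)^(e+1) = 2^e*2 by ring]; omega) hK2,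
                hsmdef, hrdef, if_neg (by omega)]
              apply maxKey_eq_of
              · rw [mem_keys_pvAdd, mem_keys_pvAdd]
                right; right; simp
              · intro x hx
                rw [mem_keys_pvAdd, mem_keys_pvAdd] at hx
                have hA := tdiv_le sm (by omega)
                have hB := tdiv_le (sm - 1) (by omega)
                rcases hx with hx | hx | hx
                · omega
                · omega
                · simp at hx; omega
            · -- finish the level, recurse
              rw [loop_step' f' _ (K - 2^e + 1 - r) sm (2^e - r) (by omega)
                (maxKey_mk2 sm (2^e - r) t (r + r) (by omega)) (by rw [getD_mk_head]; omega)]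
              rw [pvPop_mk2_fst_all sm (2^e - r) t (r + r) (by omega)]
              rw [tdiv_two sm t (by omega) (by omega), tdiv_two (sm - 1) (t - 1) (by omega) (by omega)]
              rw [pvAdd_mk1_self t (r + r) (2^e - r),
                pvAdd_mk1_new t (r + r + (2^e - r)) (t - 1) (2^e - r) (by omega)]
              have hmr' : (t + t) * 2^e + r = n - 2^e + 1 := by rw [← ht]; exact hmr
              have hD : PySem.Dict.mk [(t, r + r + ((2:Int)^e - r)), (t - 1, 2^e - r)]
                  = headDict n (2^(e+1)) := by
                rw [headDict_form n (2^(e+1)) (t - 1) (2^e + r) (by positivity)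
                  (by linear_combination hmr') (by omega)
                  (by rw [show (2:Int)^(e+1) = 2^e*2 by ring]; omega)]
                rw [if_neg (by omega)]
                simp only [PySem.Dict.mk.injEq, List.cons.injEq, Prod.mk.injEq, and_true]
                rw [show (2:Int)^(e+1) = 2^e*2 by ring]
                simp only [true_and]
                omega
              rw [hD, show K - 2^e + 1 - r - (2^e - r) = K - 2^(e+1) + 1 from by
                rw [show (2:Int)^(e+1) = 2^e*2 by ring]; ring]
              exact IH f' (by omega) (e+1) n K
                (by rw [show (2:Int)^(e+1) = 2^e*2 by ring]; omega) hKn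
                (by rw [show (2:Int)^(e+1) = 2^e*2 by ring]; omega)
        · -- sm = 2t + 1 odd
          rw [tdiv_two (sm + 1) (t + 1) (by omega) (by omega), tdiv_two sm t (by omega) (by omega)]
          by_cases ht0 : t = 0
          · -- sm = 1: the new size-1 pieces merge with the small segments
            rw [show t + 1 = sm from by omega]
            rw [pvAdd_mk1_self sm (2^e - r) r, pvAdd_mk1_new sm (2^e - r + r) t r (by omega)]
            have hn : n = 2^e + r + 2^e - 1 := by
              have hsm_eq : sm = 1 := by omega
              rw [hsm_eq, one_mul] at hmr
              omega
            by_cases hstop : K - 2^e + 1 - r ≤ 1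
            · rw [loop_stop _ _ _ (by omega)]
              dsimp only
              rw [salt_of_depth e n K hqK (by rw [show (2:Int)^(e+1) = 2^e*2 by ring]; omega) hK2,
                hsmdef, hrdef, if_neg (by omega), maxKey_mk2 _ _ _ _ (by omega)]
            · obtain ⟨f', rfl⟩ : ∃ f', f = f' + 1 := ⟨f - 1, by omega⟩
              rw [loop_step' f' _ (K - 2^e + 1 - r) sm (K - 2^e - r) (by omega)
                (maxKey_mk2 sm (2^e - r + r) t r (by omega)) (by rw [getD_mk_head]; omega)]
              rw [tdiv_two sm t (by omega) (by omega), tdiv_two (sm - 1) t (by omega) (by omega)]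
              rw [pvPop_mk2_fst_part sm (2^e - r + r) t r (K - 2^e - r) (by omega) (by omega)]
              rw [pvAdd_mk2_snd sm (2^e - r + r - (K - 2^e - r)) t r (K - 2^e - r) (by omega)]
              rw [pvAdd_mk2_snd sm (2^e - r + r - (K - 2^e - r)) t (r + (K - 2^e - r))
                (K - 2^e - r) (by omega)]
              rw [loop_stop _ _ _ (by omega)]
              dsimp only
              rw [maxKey_mk2 _ _ _ _ (by omega)]
              by_cases hK2q : K < 2^e * 2
              · rw [salt_of_depth e n K hqK (by rw [show (2:Int)^(e+1) = 2^e*2 by ring]; omega) hK2,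
                  hsmdef, hrdef, if_neg (by omega)]
              · -- person K already sits in level e+1 (all its big segments have size 1)
                rw [salt_of_depth (e+1) n K
                  (by rw [show (2:Int)^(e+1) = 2^e*2 by ring]; omega)
                  (by rw [show (2:Int)^(e+1+1) = 2^e*4 by ring]; omega) hK2]
                have hm2 : n - 2^(e+1) + 1 = r := by
                  rw [show (2:Int)^(e+1) = 2^e*2 by ring]; omega
                have hfd0 : PySem.Int.floordiv (n - 2^(e+1) + 1) (2^(e+1)) = 0 := by
                  rw [PySem.Int.floordiv_eq_iff_of_pos (by positivity), hm2]
                  constructor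
                  · rw [show (0:Int) * 2^(e+1) = 0 by ring]; omega
                  · rw [show ((0:Int) + 1) * 2^(e+1) = 2^e*2 by ring]; omega
                have hmd0 : PySem.Int.mod (n - 2^(e+1) + 1) (2^(e+1)) = r := by
                  have h2 := PySem.Int.floordiv_mul_add_mod (n - 2^(e+1) + 1) (2^(e+1))
                  rw [hfd0] at h2
                  rw [show (0:Int) * 2^(e+1) = 0 by ring] at h2
                  omega
                rw [hfd0, hmd0, if_pos (by rw [show (2:Int)^(e+1) = 2^e*2 by ring]; omega)]
                omega
          · -- sm ≥ 3: big children t+1, t are fresh keys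
            have h1t : (1:Int) ≤ t := by omega
            rw [pvAdd_mk1_new sm (2^e - r) (t + 1) r (by omega),
              pvAdd_mk2_new sm (2^e - r) (t + 1) r t r (by omega) (by omega)]
            by_cases hstop : K - 2^e + 1 - r ≤ 1
            · rw [loop_stop _ _ _ (by omega)]
              dsimp only
              rw [salt_of_depth e n K hqK (by rw [show (2:Int)^(e+1) = 2^e*2 by ring]; omega) hK2,
                hsmdef, hrdef, if_neg (by omega), maxKey_mk3 _ _ _ _ _ _ (by omega) (by omega)]
            · obtain ⟨f', rfl⟩ : ∃ f', f = f' + 1 := ⟨f - 1, by omega⟩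
              by_cases hK2q : K < 2^e * 2
              · rw [loop_step' f' _ (K - 2^e + 1 - r) sm (K - 2^e - r) (by omega)
                  (maxKey_mk3 sm (2^e - r) (t + 1) r t r (by omega) (by omega))
                  (by rw [getD_mk_head]; omega)]
                rw [pvPop_mk3_fst_part sm (2^e - r) (t + 1) r t r (K - 2^e - r)
                  (by omega) (by omega) (by omega)]
                rw [loop_stop _ _ _ (by omega)]
                dsimp only
                rw [salt_of_depth e n K hqK (by rw [show (2:Int)^(e+1) = 2^e*2 by ring]; omega) hK2,
                  hsmdef, hrdef, if_neg (by omega)]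
                apply maxKey_eq_of
                · rw [mem_keys_pvAdd, mem_keys_pvAdd]
                  right; right; simp
                · intro x hx
                  rw [mem_keys_pvAdd, mem_keys_pvAdd] at hx
                  have hA := tdiv_le sm (by omega)
                  have hB := tdiv_le (sm - 1) (by omega)
                  rcases hx with hx | hx | hx
                  · omega
                  · omega
                  · simp at hx; omega
              · rw [loop_step' f' _ (K - 2^e + 1 - r) sm (2^e - r) (by omega)
                  (maxKey_mk3 sm (2^e - r) (t + 1) r t r (by omega) (by omega))
                  (by rw [getD_mk_head]; omega)]
                rw [tdiv_two sm t (by omega) (by omega), tdiv_two (sm - 1) t (by omega) (by omega)]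
                rw [pvPop_mk3_fst_all sm (2^e - r) (t + 1) r t r (by omega) (by omega)]
                rw [pvAdd_mk2_snd (t + 1) r t r (2^e - r) (by omega)]
                rw [pvAdd_mk2_snd (t + 1) r t (r + (2^e - r)) (2^e - r) (by omega)]
                have hmr' : (2*t + 1) * 2^e + r = n - 2^e + 1 := by rw [← ht]; exact hmr
                have hD : PySem.Dict.mk [(t + 1, r), (t, r + ((2:Int)^e - r) + (2^e - r))]
                    = headDict n (2^(e+1)) := by
                  rw [headDict_form n (2^(e+1)) t r (by positivity)
                    (by linear_combination hmr') (by omega)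
                    (by rw [show (2:Int)^(e+1) = 2^e*2 by ring]; omega)]
                  rw [if_neg (by omega)]
                  simp only [PySem.Dict.mk.injEq, List.cons.injEq, Prod.mk.injEq, and_true]
                  rw [show (2:Int)^(e+1) = 2^e*2 by ring]
                  simp only [true_and]
                  omega
                rw [hD, show K - 2^e + 1 - r - (2^e - r) = K - 2^(e+1) + 1 from by
                  rw [show (2:Int)^(e+1) = 2^e*2 by ring]; ring]
                exact IH f' (by omega) (e+1) n K
                  (by rw [show (2:Int)^(e+1) = 2^e*2 by ring]; omega) hKn
                  (by rw [show (2:Int)^(e+1) = 2^e*2 by ring]; omega)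

-- ===== VERDICT (by name: the statement is the Claim_ definition above) =====
theorem solve_spec : Claim_equal_solve := by
  unfold Claim_equal_solve
  intro n k _ hpre
  unfold Spec_solve solve solve_alt
  by_cases hk1 : k ≤ 1
  · -- no serving: both return the split of the full row
    rw [loop_stop k.toNat _ k (by omega)]
    dsimp only
    rw [ofList_single]
    have hmk := maxKey_mk1 n 1
    unfold maxKey at hmk
    rw [hmk]
    unfold solveAltS
    rw [if_pos hk1]
  · have hkn : k ≤ n := by rcases hpre with h | h; omega; exact h
    have h := loop_head k.toNat 0 n k (by simp only [pow_zero]; omega) hkn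
      (by simp only [pow_zero]; omega)
    rw [show ((2:Int)^0) = 1 from by norm_num] at h
    have hH : headDict n 1 = PySem.Dict.mk [(n, 1)] := by
      rw [headDict_form n 1 n 0 (by norm_num) (by ring) (le_refl 0) (by norm_num), if_pos rfl]
    rw [hH, show k - 1 + 1 = k from by ring] at h
    unfold maxKey at h
    rw [ofList_single]
    dsimp only
    rw [h]
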